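-- pv_equiv track=rewrite | github.com/parshwa913/Sem-6-Assign | ML/ML A3/T4_22510064_A3.py | quantized_classifier
-- ===== SOURCE A (Python) =====
-- def quantized_classifier(female_data, male_data, interval_len):
--     def quantize(data):
--         return [int(x // interval_len) for x in data]
--     female_intervals = quantize(female_data)
--     male_intervals = quantize(male_data)
--     all_intervals = sorted(set(female_intervals + male_intervals))
--     predictions = []
--     actual = []
--     for interval in all_intervals:
--         female_count = female_intervals.count(interval)
--         male_count = male_intervals.count(interval)
--         majority_label = 'F' if female_count >= male_count else 'M'
--         predictions.extend([majority_label] * (female_count + male_count))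
--         actual.extend(['F'] * female_count + ['M'] * male_count)
--     return actual, predictions
-- ===== SOURCE B (Python) =====
-- def quantized_classifier(female_data, male_data, interval_len):
--     # Encode each point as one integer: interval index doubled, with the gender
--     # in the low bit (female = even, male = odd).  One sort of this flat list
--     # puts every interval's points together (females first), so a single sweep
--     # over runs of equal code // 2 yields both output lists.
--     codes = sorted([2 * (x // interval_len) for x in female_data] +
--                    [2 * (x // interval_len) + 1 for x in male_data])
--     actual = []
--     predictions = []
--     i = 0
--     n = len(codes)
--     while i < n:
--         k = codes[i] // 2
--         j = i
--         fc = 0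
--         while j < n and codes[j] // 2 == k:
--             if codes[j] % 2 == 0:
--                 fc += 1
--             j += 1
--         mc = (j - i) - fc
--         majority = 'F' if fc >= mc else 'M'
--         actual += ['F'] * fc + ['M'] * mc
--         predictions += [majority] * (j - i)
--         i = j
--     return actual, predictions
-- ===== Notes on version B (the rewrite author's own statement) =====
-- stated objective: alternative
-- what changed: Instead of A's sorted-distinct-interval loop with repeated list.count scans over both quantized lists, B encodes every point as one integer 2*(x//interval_len) + (0 female / 1 male), sorts that flat list once, and emits both output lists in a single sweep over runs of equal code//2.
import Mathlib
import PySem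

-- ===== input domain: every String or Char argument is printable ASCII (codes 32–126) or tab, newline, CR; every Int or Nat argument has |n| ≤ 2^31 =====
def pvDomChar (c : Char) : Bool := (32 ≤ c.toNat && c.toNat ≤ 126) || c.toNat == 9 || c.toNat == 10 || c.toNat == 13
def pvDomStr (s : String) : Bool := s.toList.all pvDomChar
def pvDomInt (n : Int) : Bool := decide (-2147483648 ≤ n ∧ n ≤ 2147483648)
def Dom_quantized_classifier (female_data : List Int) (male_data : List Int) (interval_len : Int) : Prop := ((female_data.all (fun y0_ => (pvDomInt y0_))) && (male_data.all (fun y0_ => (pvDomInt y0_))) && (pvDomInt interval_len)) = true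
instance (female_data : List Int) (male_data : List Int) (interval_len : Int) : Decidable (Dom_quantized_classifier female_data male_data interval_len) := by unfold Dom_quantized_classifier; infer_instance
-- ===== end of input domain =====

-- B encodes each point as 2*(x//interval_len) + (0 for female, 1 for male), sorts that flat
-- integer list once and sweeps runs of equal code//2, instead of A's per-interval .count scans
-- over both quantized lists (alternative algorithm).
-- Pre_ excludes only the inputs where Python's // raises ZeroDivisionError (interval_len = 0 with data).


-- ===== PORT A =====
def quantized_classifier (female_data : List Int) (male_data : List Int) (interval_len : Int) : List String × List String :=
  let quantize : List Int → List Int := fun data => data.map (fun x => PySem.Int.floordiv x interval_len)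
  let female_intervals := quantize female_data
  let male_intervals := quantize male_data
  let all_intervals := PySem.List.sorted (PySem.Set.ofList (female_intervals ++ male_intervals)) (fun x => x) false
  -- the loop carries (actual, predictions); both are extended each iteration
  let st := all_intervals.foldl (fun (acc : List String × List String) interval =>
    let female_count : Int := PySem.List.count female_intervals interval
    let male_count : Int := PySem.List.count male_intervals interval
    let majority_label := if female_count ≥ male_count then "F" else "M"
    ( acc.1 ++ (PySem.List.pyRepeat ["F"] female_count ++ PySem.List.pyRepeat ["M"] male_count),
      acc.2 ++ PySem.List.pyRepeat [majority_label] (female_count + male_count) )) ([], [])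
  (st.1, st.2)

-- ===== PORT B =====
-- inner while loop of Source B: starting from (fc, cnt), consume codes whose code // 2 equals k,
-- counting even codes in fc and all consumed codes in cnt; returns (fc, cnt, unconsumed rest)
def pvScan (k : Int) : List Int → Int → Int → Int × Int × List Int
  | [], fc, cnt => (fc, cnt, [])
  | c :: cs, fc, cnt =>
      if PySem.Int.floordiv c 2 == k then
        pvScan k cs (if PySem.Int.mod c 2 == 0 then fc + 1 else fc) (cnt + 1)
      else (fc, cnt, c :: cs)

lemma pvScan_rest_length_le (k : Int) (l : List Int) (fc cnt : Int) :
    (pvScan k l fc cnt).2.2.length ≤ l.length := by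
  induction l generalizing fc cnt with
  | nil => simp [pvScan]
  | cons c cs ih =>
      simp only [pvScan]
      split
      · exact le_trans (ih _ _) (by simp)
      · simp

-- outer while loop of Source B over the sorted codes, appending to actual / predictions
def pvSweep : List Int → List String → List String → List String × List String
  | [], actual, predictions => (actual, predictions)
  | c :: cs, actual, predictions =>
      let k := PySem.Int.floordiv c 2
      let r := pvScan k cs (if PySem.Int.mod c 2 == 0 then (1 : Int) else 0) 1
      let fc := r.1
      let cnt := r.2.1
      let rest := r.2.2
      let mc := cnt - fc
      let majority := if fc ≥ mc then "F" else "M"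
      pvSweep rest (actual ++ (PySem.List.pyRepeat ["F"] fc ++ PySem.List.pyRepeat ["M"] mc))
        (predictions ++ PySem.List.pyRepeat [majority] cnt)
  termination_by l _ _ => l.length
  decreasing_by
    exact Nat.lt_succ_of_le (pvScan_rest_length_le _ _ _ _)

def quantized_classifier_alt (female_data : List Int) (male_data : List Int) (interval_len : Int) : List String × List String :=
  let codes := PySem.List.sorted
    (female_data.map (fun x => 2 * PySem.Int.floordiv x interval_len)
      ++ male_data.map (fun x => 2 * PySem.Int.floordiv x interval_len + 1))
    (fun x => x) false
  pvSweep codes [] []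

-- ===== PRECONDITION & SPEC =====
-- Pre_ excludes exactly the inputs where A (and B) raise ZeroDivisionError: interval_len = 0 with at least one data point to quantize.
def Pre_quantized_classifier (female_data : List Int) (male_data : List Int) (interval_len : Int) : Prop := interval_len ≠ 0 ∨ (female_data = [] ∧ male_data = [])
instance (female_data : List Int) (male_data : List Int) (interval_len : Int) : Decidable (Pre_quantized_classifier female_data male_data interval_len) := by unfold Pre_quantized_classifier; infer_instance
def pvWitness_quantized_classifier : List Int × List Int × Int := ([1, 4, 5, -3], [4, 9], 3)

def Spec_quantized_classifier (female_data : List Int) (male_data : List Int) (interval_len : Int) (out : List String × List String) : Prop := out = quantized_classifier_alt female_data male_data interval_len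
instance (female_data : List Int) (male_data : List Int) (interval_len : Int) (out : List String × List String) : Decidable (Spec_quantized_classifier female_data male_data interval_len out) := by unfold Spec_quantized_classifier; infer_instance

-- ===== CLAIM (what is proved, stated in full; the proofs are below) =====
def Claim_equal_quantized_classifier : Prop := ∀ (female_data : List Int) (male_data : List Int) (interval_len : Int), Dom_quantized_classifier female_data male_data interval_len → Pre_quantized_classifier female_data male_data interval_len → Spec_quantized_classifier female_data male_data interval_len (quantized_classifier female_data male_data interval_len)

-- ===== LEMMAS AND PROOFS =====

-- per-interval pieces of the two outputs and of the sorted code list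
def pvG (fi mi : List Int) (k : Int) : List String :=
  List.replicate (fi.count k) "F" ++ List.replicate (mi.count k) "M"
def pvH (fi mi : List Int) (k : Int) : List String :=
  List.replicate (fi.count k + mi.count k) (if ((fi.count k : Int)) ≥ ((mi.count k : Int)) then "F" else "M")
def pvBlock (fi mi : List Int) (k : Int) : List Int :=
  List.replicate (fi.count k) (2 * k) ++ List.replicate (mi.count k) (2 * k + 1)

lemma floordiv_two_mul (k : Int) : PySem.Int.floordiv (2 * k) 2 = k := by
  rw [PySem.Int.floordiv_eq_ediv_of_pos (by norm_num)]; omega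
lemma floordiv_two_mul_add_one (k : Int) : PySem.Int.floordiv (2 * k + 1) 2 = k := by
  rw [PySem.Int.floordiv_eq_ediv_of_pos (by norm_num)]; omega
lemma mod_two_mul (k : Int) : PySem.Int.mod (2 * k) 2 = 0 := by
  rw [PySem.Int.mod_eq_emod_of_pos (by norm_num)]; omega
lemma mod_two_mul_add_one (k : Int) : PySem.Int.mod (2 * k + 1) 2 = 1 := by
  rw [PySem.Int.mod_eq_emod_of_pos (by norm_num)]; omega

lemma mem_pvBlock {fi mi : List Int} {k c : Int} (h : c ∈ pvBlock fi mi k) :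
    c = 2 * k ∨ c = 2 * k + 1 := by
  rcases List.mem_append.mp h with h' | h'
  · exact Or.inl (List.eq_of_mem_replicate h')
  · exact Or.inr (List.eq_of_mem_replicate h')

-- grouping: a nodup key list covering xs reassembles xs up to permutation
lemma count_flatMap_replicate (K : List Int) (xs : List Int) (hnd : K.Nodup) (c : Int) :
    (K.flatMap fun k => List.replicate (xs.count k) k).count c
      = if c ∈ K then xs.count c else 0 := by
  induction K with
  | nil => simp
  | cons k K' ih =>
      rcases List.nodup_cons.mp hnd with ⟨hk, hnd'⟩
      simp only [List.flatMap_cons, List.count_append, ih hnd', List.count_replicate, List.mem_cons]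
      by_cases hck : c = k
      · subst hck; simp [hk]
      · simp [hck, Ne.symm hck]

lemma perm_flatMap_replicate (K xs : List Int) (hnd : K.Nodup) (hcov : ∀ x ∈ xs, x ∈ K) :
    (K.flatMap fun k => List.replicate (xs.count k) k).Perm xs := by
  rw [List.perm_iff_count]
  intro c
  rw [count_flatMap_replicate K xs hnd c]
  by_cases hc : c ∈ K
  · simp [hc]
  · simp [hc, List.count_eq_zero_of_not_mem (fun h => hc (hcov c h))]

lemma flatMap_append_perm (K : List Int) (B1 B2 : Int → List Int) :
    (K.flatMap fun k => B1 k ++ B2 k).Perm (K.flatMap B1 ++ K.flatMap B2) := by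
  induction K with
  | nil => simp
  | cons k K' ih =>
      simp only [List.flatMap_cons]
      have h1 : ((B1 k ++ B2 k) ++ K'.flatMap fun k => B1 k ++ B2 k)
          = B1 k ++ (B2 k ++ K'.flatMap fun k => B1 k ++ B2 k) := by simp [List.append_assoc]
      have h2 : ((B1 k ++ K'.flatMap B1) ++ (B2 k ++ K'.flatMap B2))
          = B1 k ++ (K'.flatMap B1 ++ (B2 k ++ K'.flatMap B2)) := by simp [List.append_assoc]
      rw [h1, h2]
      exact List.Perm.append_left _ (((ih).append_left _).trans (List.perm_append_comm_assoc _ _ _))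

-- the per-interval blocks, laid out along sorted distinct intervals, are pairwise ordered
lemma pvBlock_pairwise (fi mi : List Int) (K : List Int) (h : K.Pairwise (· < ·)) :
    (K.flatMap (pvBlock fi mi)).Pairwise (fun a b => a ≤ b) := by
  induction K with
  | nil => simp
  | cons k K' ih =>
      rcases List.pairwise_cons.mp h with ⟨hk, h'⟩
      simp only [List.flatMap_cons]
      rw [List.pairwise_append]
      refine ⟨?_, ih h', ?_⟩
      · unfold pvBlock
        rw [List.pairwise_append]
        refine ⟨List.pairwise_replicate.mpr (Or.inr le_rfl),
                List.pairwise_replicate.mpr (Or.inr le_rfl), ?_⟩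
        intro a ha b hb
        rw [(List.mem_replicate.mp ha).2, (List.mem_replicate.mp hb).2]
        omega
      · intro a ha b hb
        rcases List.mem_flatMap.mp hb with ⟨k', hk', hbk⟩
        have hkk' := hk k' hk'
        rcases mem_pvBlock ha with h1 | h1 <;> rcases mem_pvBlock hbk with h2 | h2 <;> omega

-- the sorted code list decomposes into per-interval blocks over the sorted distinct intervals
lemma sorted_codes_eq (fi mi : List Int) :
    PySem.List.sorted (fi.map (fun q => 2 * q) ++ mi.map (fun q => 2 * q + 1)) (fun x => x) false
      = (PySem.List.sorted (PySem.Set.ofList (fi ++ mi)) (fun x => x) false).flatMap (pvBlock fi mi) := by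
  have hK : (PySem.List.sorted (PySem.Set.ofList (fi ++ mi)) (fun x => x) false).Nodup :=
    (PySem.List.sorted_perm _ _ _).nodup_iff.mpr (PySem.Set.nodup_ofList _)
  have hcovf : ∀ x ∈ fi, x ∈ PySem.List.sorted (PySem.Set.ofList (fi ++ mi)) (fun x => x) false := by
    intro x hx
    rw [PySem.List.mem_sorted, PySem.Set.mem_ofList]
    exact List.mem_append.mpr (Or.inl hx)
  have hcovm : ∀ x ∈ mi, x ∈ PySem.List.sorted (PySem.Set.ofList (fi ++ mi)) (fun x => x) false := by
    intro x hx
    rw [PySem.List.mem_sorted, PySem.Set.mem_ofList]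
    exact List.mem_append.mpr (Or.inr hx)
  refine PySem.List.eq_of_perm_of_pairwise_le_of_injective (fun x => x) (fun a b h => h) ?_ ?_ ?_
  · refine (PySem.List.sorted_perm _ _ _).trans (List.Perm.symm ?_)
    have hsplit : ((PySem.List.sorted (PySem.Set.ofList (fi ++ mi)) (fun x => x) false).flatMap
        (pvBlock fi mi)).Perm
        ((PySem.List.sorted (PySem.Set.ofList (fi ++ mi)) (fun x => x) false).flatMap
          (fun k => List.replicate (fi.count k) (2 * k))
        ++ (PySem.List.sorted (PySem.Set.ofList (fi ++ mi)) (fun x => x) false).flatMap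
          (fun k => List.replicate (mi.count k) (2 * k + 1))) :=
      flatMap_append_perm _ _ _
    refine hsplit.trans (List.Perm.append ?_ ?_)
    · have he : (PySem.List.sorted (PySem.Set.ofList (fi ++ mi)) (fun x => x) false).flatMap
          (fun k => List.replicate (fi.count k) (2 * k))
          = ((PySem.List.sorted (PySem.Set.ofList (fi ++ mi)) (fun x => x) false).flatMap
              (fun k => List.replicate (fi.count k) k)).map (fun q => 2 * q) := by
        rw [List.map_flatMap]
        simp [List.map_replicate]
      rw [he]
      exact (perm_flatMap_replicate _ fi hK hcovf).map _
    · have he : (PySem.List.sorted (PySem.Set.ofList (fi ++ mi)) (fun x => x) false).flatMap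
          (fun k => List.replicate (mi.count k) (2 * k + 1))
          = ((PySem.List.sorted (PySem.Set.ofList (fi ++ mi)) (fun x => x) false).flatMap
              (fun k => List.replicate (mi.count k) k)).map (fun q => 2 * q + 1) := by
        rw [List.map_flatMap]
        simp [List.map_replicate]
      rw [he]
      exact (perm_flatMap_replicate _ mi hK hcovm).map _
  · exact PySem.List.sorted_pairwise _ (fun x => x)
  · exact pvBlock_pairwise fi mi _ (PySem.List.sorted_ofList_pairwise_lt _)

-- pvScan consumes exactly the in-block elements
lemma pvScan_spec (k : Int) (inside rest : List Int) (fc cnt : Int)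
    (hin : ∀ c ∈ inside, PySem.Int.floordiv c 2 = k)
    (hrest : ∀ d ds, rest = d :: ds → PySem.Int.floordiv d 2 ≠ k) :
    pvScan k (inside ++ rest) fc cnt
      = (fc + (inside.countP (fun c => PySem.Int.mod c 2 == 0) : Int), cnt + inside.length, rest) := by
  induction inside generalizing fc cnt with
  | nil =>
      cases rest with
      | nil => simp [pvScan]
      | cons d ds =>
          have hd := hrest d ds rfl
          simp only [List.nil_append, pvScan, List.countP_nil, List.length_nil]
          rw [if_neg (by simpa using hd)]
          simp
  | cons c cs ih =>
      have hc := hin c (by simp)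
      simp only [List.cons_append, pvScan, hc, beq_self_eq_true, if_true]
      rw [ih _ _ (fun x hx => hin x (List.mem_cons_of_mem _ hx))]
      simp only [List.countP_cons, List.length_cons]
      refine Prod.ext ?_ (Prod.ext ?_ rfl)
      · split_ifs <;> omega
      · simp; omega

-- one outer iteration of the sweep handles one block
lemma pvSweep_block (fi mi : List Int) (k : Int) (rest : List Int) (act pred : List String)
    (hpos : 0 < fi.count k + mi.count k)
    (hrest : ∀ d ds, rest = d :: ds → PySem.Int.floordiv d 2 ≠ k) :
    pvSweep (pvBlock fi mi k ++ rest) act pred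
      = pvSweep rest (act ++ pvG fi mi k) (pred ++ pvH fi mi k) := by
  rcases ha : fi.count k with _ | a'
  · rcases hb : mi.count k with _ | b'
    · rw [ha, hb] at hpos; omega
    · have hblock : pvBlock fi mi k = (2 * k + 1) :: List.replicate b' (2 * k + 1) := by
        rw [pvBlock, ha, hb]
        simp [List.replicate_succ]
      rw [hblock]
      simp only [List.cons_append, pvSweep, floordiv_two_mul_add_one, mod_two_mul_add_one,
        show ((1 : Int) == 0) = false from rfl, Bool.false_eq_true, if_false]
      rw [pvScan_spec k (List.replicate b' (2 * k + 1)) rest _ _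
        (fun c hc => by rw [(List.mem_replicate.mp hc).2]; exact floordiv_two_mul_add_one k) hrest]
      have hcp : (List.replicate b' (2 * k + 1)).countP (fun c => PySem.Int.mod c 2 == 0) = 0 := by
        simp [List.countP_replicate]
      rw [hcp]
      simp only [PySem.List.pyRepeat_singleton, List.length_replicate, Nat.cast_zero, add_zero,
        sub_zero]
      rw [if_neg (by omega)]
      have h1 : pvG fi mi k = List.replicate (b' + 1) "M" := by
        rw [pvG, ha, hb]; simp
      have h2 : pvH fi mi k = List.replicate (b' + 1) "M" := by
        rw [pvH, ha, hb]
        rw [if_neg (by push_cast; omega)]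
        simp
      rw [h1, h2, show ((0 : Int)).toNat = 0 from rfl,
        show ((1 : Int) + (b' : Int)).toNat = b' + 1 from by omega]
      simp
  · have hblock : pvBlock fi mi k
        = 2 * k :: (List.replicate a' (2 * k) ++ List.replicate (mi.count k) (2 * k + 1)) := by
      rw [pvBlock, ha]
      simp [List.replicate_succ]
    rw [hblock]
    simp only [List.cons_append, pvSweep, floordiv_two_mul, mod_two_mul,
      beq_self_eq_true, if_true]
    rw [← List.append_assoc]
    rw [pvScan_spec k (List.replicate a' (2 * k) ++ List.replicate (mi.count k) (2 * k + 1)) rest _ _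
      (fun c hc => by
        rcases List.mem_append.mp hc with h | h
        · rw [(List.mem_replicate.mp h).2]; exact floordiv_two_mul k
        · rw [(List.mem_replicate.mp h).2]; exact floordiv_two_mul_add_one k) hrest]
    have hcp : ((List.replicate a' (2 * k) ++ List.replicate (mi.count k) (2 * k + 1)).countP
        (fun c => PySem.Int.mod c 2 == 0)) = a' := by
      simp [List.countP_append, List.countP_replicate]
    rw [hcp]
    simp only [PySem.List.pyRepeat_singleton, List.length_append, List.length_replicate]
    have h1 : pvG fi mi k = List.replicate (a' + 1) "F" ++ List.replicate (mi.count k) "M" := by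
      rw [pvG, ha]
    have h2 : pvH fi mi k = List.replicate (a' + 1 + mi.count k)
        (if (1 : Int) + (a' : Int) ≥ ((mi.count k : Nat) : Int) then "F" else "M") := by
      rw [pvH, ha]
      have hiff : ((((a' + 1 : Nat)) : Int) ≥ ((mi.count k : Nat) : Int))
          ↔ ((1 : Int) + (a' : Int) ≥ ((mi.count k : Nat) : Int)) := by omega
      simp only [hiff]
    have eF : ((1 : Int) + (a' : Int)).toNat = a' + 1 := by omega
    have eM : ((1 : Int) + ((a' + mi.count k : Nat) : Int) - ((1 : Int) + (a' : Int))).toNat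
        = mi.count k := by omega
    have eC : ((1 : Int) + ((a' + mi.count k : Nat) : Int)).toNat = a' + 1 + mi.count k := by omega
    have eIf : ((1 : Int) + (a' : Int) ≥ (1 : Int) + ((a' + mi.count k : Nat) : Int)
          - ((1 : Int) + (a' : Int)))
        ↔ ((1 : Int) + (a' : Int) ≥ ((mi.count k : Nat) : Int)) := by omega
    rw [h1, h2, eF, eM, eC]
    simp only [eIf]
    rw [List.append_assoc]

-- the sweep over the full block decomposition
lemma pvSweep_flatMap (fi mi : List Int) (K : List Int) (act pred : List String)
    (hsorted : K.Pairwise (· < ·))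
    (hpos : ∀ k ∈ K, 0 < fi.count k + mi.count k) :
    pvSweep (K.flatMap (pvBlock fi mi)) act pred
      = (act ++ K.flatMap (pvG fi mi), pred ++ K.flatMap (pvH fi mi)) := by
  induction K generalizing act pred with
  | nil => simp [pvSweep]
  | cons k K' ih =>
      rcases List.pairwise_cons.mp hsorted with ⟨hk, h'⟩
      simp only [List.flatMap_cons]
      rw [pvSweep_block fi mi k _ act pred (hpos k (by simp)) ?_]
      · rw [ih _ _ h' (fun x hx => hpos x (List.mem_cons_of_mem _ hx))]
        simp [List.append_assoc]
      · intro d ds hds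
        have hd : d ∈ K'.flatMap (pvBlock fi mi) := by rw [hds]; simp
        rcases List.mem_flatMap.mp hd with ⟨k', hk', hdk⟩
        have hlt := hk k' hk'
        rcases mem_pvBlock hdk with h1 | h1 <;>
          · rw [h1]
            first
              | rw [floordiv_two_mul] | rw [floordiv_two_mul_add_one]
            omega

theorem quantized_classifier_spec : Claim_equal_quantized_classifier := by
  intro f m L _ _
  unfold Spec_quantized_classifier quantized_classifier quantized_classifier_alt
  simp only []
  -- name the quantized lists
  set fi := f.map (fun x => PySem.Int.floordiv x L) with hfi
  set mi := m.map (fun x => PySem.Int.floordiv x L) with hmi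
  -- B's code list is the doubled/odd-shifted quantized lists
  have hmapf : f.map (fun x => 2 * PySem.Int.floordiv x L) = fi.map (fun q => 2 * q) := by
    rw [hfi, List.map_map]; rfl
  have hmapm : m.map (fun x => 2 * PySem.Int.floordiv x L + 1) = mi.map (fun q => 2 * q + 1) := by
    rw [hmi, List.map_map]; rfl
  rw [hmapf, hmapm, sorted_codes_eq fi mi]
  rw [pvSweep_flatMap fi mi _ [] [] (PySem.List.sorted_ofList_pairwise_lt _) ?_]
  · -- A's loop in closed form
    rw [PySem.List.foldl_prod_mk
        (f := fun (acc : List String) interval => acc ++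
          (PySem.List.pyRepeat ["F"] (PySem.List.count fi interval)
            ++ PySem.List.pyRepeat ["M"] (PySem.List.count mi interval)))
        (g := fun (acc : List String) interval => acc ++
          PySem.List.pyRepeat
            [if ((PySem.List.count fi interval : Int)) ≥ ((PySem.List.count mi interval : Int))
              then "F" else "M"]
            ((PySem.List.count fi interval : Int) + (PySem.List.count mi interval : Int)))]
    rw [PySem.List.foldl_append_eq_flatMap, PySem.List.foldl_append_eq_flatMap]
    simp only [List.nil_append]
    rw [← hfi, ← hmi]
    refine Prod.ext ?_ ?_
    · refine congrArg (fun g => List.flatMap g _) (funext fun k => ?_)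
      simp [pvG, PySem.List.pyRepeat_singleton, PySem.List.count_eq]
    · refine congrArg (fun g => List.flatMap g _) (funext fun k => ?_)
      simp only [pvH, PySem.List.pyRepeat_singleton, PySem.List.count_eq]
      congr 1
  · intro k hkmem
    rw [PySem.List.mem_sorted, PySem.Set.mem_ofList] at hkmem
    rcases List.mem_append.mp hkmem with h | h
    · have := List.count_pos_iff.mpr h; omega
    · have := List.count_pos_iff.mpr h; omega
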